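-- pv_equiv track=rewrite | github.com/sarveshbhatnagar/CompetetiveProgramming | jump_game_4.py | maxResult2
-- ===== SOURCE A (Python) =====
-- from typing import List
-- import heapq
--
-- def maxResult2(nums: List[int], k: int) -> int:
--     # return self.get_max(nums[0], nums[1:], k)
--     # What i need to do is start from end, keep track of max value for
--     # every position.
--     q = [(-nums[-1], len(nums)-1)]
--     for i in range(len(nums)-2, -1, -1):
--         while(q and q[0][1] > i+k):
--             heapq.heappop(q)
--         v = nums[i] + (-q[0][0])
--         heapq.heappush(q, (-v, i))
--         if i == 0:
--             return v
-- ===== SOURCE B (Python) =====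
-- def maxResult2(nums, k):
--     # Backward DP: dp[i] = best score starting at i; window max by direct slice scan.
--     n = len(nums)
--     dp = [0] * n
--     dp[n-1] = nums[n-1]
--     for i in range(n-2, -1, -1):
--         dp[i] = nums[i] + max(dp[i+1 : i+k+1])
--     return dp[0]
-- ===== Notes on version B (the rewrite author's own statement) =====
-- stated objective: simpler
-- what changed: Replaced the lazy-deletion min-heap over (-value, index) pairs by a plain backward DP array whose window maximum is taken with a direct max() over the slice dp[i+1:i+k+1], removing the heap entirely.
-- outside the precondition, e.g. on maxResult2([5], 3): A returns None, B returns 5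
import Mathlib
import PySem

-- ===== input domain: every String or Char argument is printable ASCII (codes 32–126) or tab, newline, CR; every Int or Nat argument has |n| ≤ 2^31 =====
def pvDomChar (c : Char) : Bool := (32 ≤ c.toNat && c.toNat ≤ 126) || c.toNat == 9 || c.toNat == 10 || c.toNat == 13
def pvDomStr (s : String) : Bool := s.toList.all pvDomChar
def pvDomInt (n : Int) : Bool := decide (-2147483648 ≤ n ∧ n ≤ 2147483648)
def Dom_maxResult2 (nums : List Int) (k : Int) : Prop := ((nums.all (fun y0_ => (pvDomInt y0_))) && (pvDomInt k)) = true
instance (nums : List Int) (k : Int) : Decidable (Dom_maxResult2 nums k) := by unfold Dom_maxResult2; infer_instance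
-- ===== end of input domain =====

-- B replaces A's lazy-deletion min-heap DP by a plain backward DP array with a
-- direct window max (simpler, no heap); return value only (A mutates no argument).

-- ===== PORT A =====
-- heapq is used by A only through q[0] (the minimum pair) and heappop (remove the
-- minimum): we port the heap by that library contract, as the multiset of its
-- pairs with `heapMin?` = the lexicographic minimum (q[0]) and `erase` of the
-- minimum = heappop; heappush = cons.  Pairs are exact Python tuples (Int × Int).
def heapMin? : List (Int × Int) → Option (Int × Int)
  | [] => none
  | p :: rest =>
    match heapMin? rest with
    | none => some p
    | some m => if p.1 < m.1 ∨ (p.1 = m.1 ∧ p.2 < m.2) then some p else some m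

theorem heapMin?_mem {q : List (Int × Int)} {m : Int × Int}
    (h : heapMin? q = some m) : m ∈ q := by
  induction q with
  | nil => simp [heapMin?] at h
  | cons p rest ih =>
    simp only [heapMin?] at h
    cases hr : heapMin? rest with
    | none => rw [hr] at h; simp at h; simp [h]
    | some m' =>
      rw [hr] at h
      by_cases hc : p.1 < m'.1 ∨ (p.1 = m'.1 ∧ p.2 < m'.2)
      · simp [hc] at h; simp [h]
      · simp [hc] at h; subst h; exact List.mem_cons_of_mem _ (ih hr)

-- while q and q[0][1] > i+k: heapq.heappop(q)
def popStale (bound : Int) (q : List (Int × Int)) : List (Int × Int) :=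
  match h : heapMin? q with
  | none => q
  | some m => if bound < m.2 then popStale bound (q.erase m) else q
termination_by q.length
decreasing_by
  exact List.length_erase_of_mem (heapMin?_mem h) ▸ Nat.sub_lt (List.length_pos_of_mem (heapMin?_mem h)) one_pos

-- the for-loop, i descending; i == 0 returns v without pushing
def loopA (nums : List Int) (k : Int) : Nat → List (Int × Int) → Int
  | 0, q =>
      (PySem.List.pyGet? nums ((0 : Nat) : Int)).getD 0 +
        (-((heapMin? (popStale (((0 : Nat) : Int) + k) q)).getD (0, 0)).1)
  | (i+1), q =>
      loopA nums k i
        ((-((PySem.List.pyGet? nums ((i+1 : Nat) : Int)).getD 0 +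
            (-((heapMin? (popStale (((i+1 : Nat) : Int) + k) q)).getD (0, 0)).1)),
          ((i+1 : Nat) : Int))
          :: popStale (((i+1 : Nat) : Int) + k) q)

def maxResult2 (nums : List Int) (k : Int) : Int :=
  -- Python raises IndexError on [], and falls off the loop returning None when
  -- len(nums) == 1; both are outside Pre_, the guard only keeps the port total.
  if 2 ≤ nums.length then
    loopA nums k (nums.length - 2)
      [(-((PySem.List.pyGet? nums (-1)).getD 0), ((nums.length : Int) - 1))]
  else 0

-- ===== PORT B =====
-- dp built back to front; dp[i] = nums[i] + max(dp[i+1 : i+k+1])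
def bLoop (k : Int) : List Int → List Int
  | [] => []
  | [x] => [x]
  | x :: y :: rest =>
      let dp := bLoop k (y :: rest)
      (x + (PySem.List.max? (dp.take k.toNat) (fun v => v)).getD 0) :: dp

def maxResult2_alt (nums : List Int) (k : Int) : Int :=
  (bLoop k nums).headD 0

-- ===== PRECONDITION & SPEC =====
-- Pre_ excludes nums = [] and k ≤ 0, where A raises IndexError, and
-- single-element lists, where A falls off its loop and returns None (no int).
def Pre_maxResult2 (nums : List Int) (k : Int) : Prop := 2 ≤ nums.length ∧ 1 ≤ k
instance (nums : List Int) (k : Int) : Decidable (Pre_maxResult2 nums k) := by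
  unfold Pre_maxResult2; infer_instance

def pvWitness_maxResult2 : List Int × Int := ([1, -2, 3], 2)

def Spec_maxResult2 (nums : List Int) (k : Int) (out : Int) : Prop := out = maxResult2_alt nums k
instance (nums : List Int) (k : Int) (out : Int) : Decidable (Spec_maxResult2 nums k out) := by unfold Spec_maxResult2; infer_instance

-- ===== CLAIM (what is proved, stated in full; the proofs are below) =====
def Claim_equal_maxResult2 : Prop := ∀ (nums : List Int) (k : Int), Dom_maxResult2 nums k → Pre_maxResult2 nums k → Spec_maxResult2 nums k (maxResult2 nums k)

-- ===== LEMMAS AND PROOFS =====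

theorem heapMin?_cons_isSome (p : Int × Int) (rest : List (Int × Int)) :
    (heapMin? (p :: rest)).isSome := by
  simp only [heapMin?]
  split
  · rfl
  · split <;> rfl

theorem heapMin?_isSome {q : List (Int × Int)} (h : q ≠ []) : (heapMin? q).isSome := by
  cases q with
  | nil => exact absurd rfl h
  | cons p rest => exact heapMin?_cons_isSome p rest

theorem heapMin?_le : ∀ (q : List (Int × Int)) (m : Int × Int),
    heapMin? q = some m → ∀ p ∈ q, m.1 ≤ p.1 := by
  intro q
  induction q with
  | nil => intro m h; simp [heapMin?] at h
  | cons p rest ih =>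
    intro m h p' hp'
    simp only [heapMin?] at h
    cases hr : heapMin? rest with
    | none =>
      rw [hr] at h; simp at h
      have hrest : rest = [] := by
        cases rest with
        | nil => rfl
        | cons a b =>
          have := heapMin?_cons_isSome a b
          rw [hr] at this; simp at this
      subst hrest; subst h
      rcases List.mem_cons.mp hp' with h1 | h1
      · subst h1; exact le_refl _
      · simp at h1
    | some m' =>
      rw [hr] at h
      by_cases hc : p.1 < m'.1 ∨ (p.1 = m'.1 ∧ p.2 < m'.2)
      · simp [hc] at h; subst h
        rcases List.mem_cons.mp hp' with h1 | h1
        · subst h1; exact le_refl _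
        · have := ih _ hr p' h1; omega
      · simp [hc] at h; subst h
        rcases List.mem_cons.mp hp' with h1 | h1
        · subst h1; omega
        · exact ih _ hr p' h1

theorem popStale_nil (bound : Int) : popStale bound [] = [] := by
  rw [popStale.eq_def]; rfl

theorem popStale_subset_aux : ∀ (n : Nat) (bound : Int) (q : List (Int × Int)),
    q.length ≤ n → ∀ p ∈ popStale bound q, p ∈ q := by
  intro n
  induction n with
  | zero =>
    intro bound q hq p hp
    have hq0 : q = [] := by cases q with | nil => rfl | cons a b => simp at hq
    subst hq0; rw [popStale_nil] at hp; exact hp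
  | succ n ih =>
    intro bound q hq p hp
    rw [popStale.eq_def] at hp
    split at hp
    · exact hp
    · rename_i m0 h0
      split at hp
      · have hm0 : m0 ∈ q := heapMin?_mem h0
        have h1 := List.length_erase_of_mem hm0
        have h2 := List.length_pos_of_mem hm0
        exact List.mem_of_mem_erase (ih bound (q.erase m0) (by omega) p hp)
      · exact hp

theorem popStale_subset (bound : Int) (q : List (Int × Int)) :
    ∀ p ∈ popStale bound q, p ∈ q :=
  popStale_subset_aux q.length bound q (le_refl _)

theorem popStale_keeps_aux : ∀ (n : Nat) (bound : Int) (q : List (Int × Int)),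
    q.length ≤ n → ∀ p ∈ q, p.2 ≤ bound → p ∈ popStale bound q := by
  intro n
  induction n with
  | zero =>
    intro bound q hq p hp _
    have hq0 : q = [] := by cases q with | nil => rfl | cons a b => simp at hq
    subst hq0; simp at hp
  | succ n ih =>
    intro bound q hq p hp hple
    rw [popStale.eq_def]
    split
    · exact hp
    · rename_i m0 h0
      split
      · rename_i hlt
        have hm0 : m0 ∈ q := heapMin?_mem h0
        have h1 := List.length_erase_of_mem hm0
        have h2 := List.length_pos_of_mem hm0
        have hne : p ≠ m0 := by intro he; subst he; omega
        exact ih bound (q.erase m0) (by omega) p ((List.mem_erase_of_ne hne).mpr hp) hple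
      · exact hp

theorem popStale_keeps (bound : Int) (q : List (Int × Int)) :
    ∀ p ∈ q, p.2 ≤ bound → p ∈ popStale bound q :=
  popStale_keeps_aux q.length bound q (le_refl _)

theorem popStale_min_le_aux : ∀ (n : Nat) (bound : Int) (q : List (Int × Int)),
    q.length ≤ n → ∀ m : Int × Int, heapMin? (popStale bound q) = some m → m.2 ≤ bound := by
  intro n
  induction n with
  | zero =>
    intro bound q hq m hm
    have hq0 : q = [] := by cases q with | nil => rfl | cons a b => simp at hq
    subst hq0; rw [popStale_nil] at hm; simp [heapMin?] at hm
  | succ n ih =>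
    intro bound q hq m hm
    rw [popStale.eq_def] at hm
    split at hm
    · rename_i h0
      rw [h0] at hm; simp at hm
    · rename_i m0 h0
      split at hm
      · have hm0 : m0 ∈ q := heapMin?_mem h0
        have h1 := List.length_erase_of_mem hm0
        have h2 := List.length_pos_of_mem hm0
        exact ih bound (q.erase m0) (by omega) m hm
      · rename_i hlt
        rw [h0] at hm
        have : m0 = m := by simpa using hm
        subst this; omega

theorem popStale_min_le (bound : Int) (q : List (Int × Int)) {m : Int × Int}
    (h : heapMin? (popStale bound q) = some m) : m.2 ≤ bound :=
  popStale_min_le_aux q.length bound q (le_refl _) m h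

theorem bLoop_length (k : Int) (l : List Int) : (bLoop k l).length = l.length := by
  induction l with
  | nil => simp [bLoop]
  | cons x rest ih =>
    cases rest with
    | nil => simp [bLoop]
    | cons y r =>
      simp only [bLoop, List.length_cons]
      rw [ih]
      simp

theorem bLoop_tail (k : Int) (x : Int) (xs : List Int) :
    (bLoop k (x :: xs)).tail = bLoop k xs := by
  cases xs with
  | nil => simp [bLoop]
  | cons y r => simp [bLoop]

theorem bLoop_drop (k : Int) : ∀ (i : Nat) (l : List Int),
    bLoop k (l.drop i) = (bLoop k l).drop i := by
  intro i
  induction i with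
  | zero => intro l; simp
  | succ i ih =>
    intro l
    cases l with
    | nil => simp [bLoop]
    | cons x xs =>
      have h1 : (x :: xs).drop (i + 1) = xs.drop i := rfl
      rw [h1, ih xs, ← bLoop_tail k x xs, ← List.drop_one, List.drop_drop, Nat.add_comm]

theorem bLoop_cons (k : Int) (x : Int) (xs : List Int) (hxs : xs ≠ []) :
    bLoop k (x :: xs)
      = (x + (PySem.List.max? ((bLoop k xs).take k.toNat) (fun v => v)).getD 0) :: bLoop k xs := by
  cases xs with
  | nil => exact absurd rfl hxs
  | cons y r => simp [bLoop]

theorem bLoop_getD_some (nums : List Int) (k : Int) (j : Nat) (hj : j < nums.length) :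
    (bLoop k nums)[j]? = some ((bLoop k nums).getD j 0) := by
  have hb : j < (bLoop k nums).length := by rw [bLoop_length]; omega
  rw [List.getD_eq_getElem?_getD, List.getElem?_eq_getElem hb]
  rfl

-- the dp recurrence: dp[i] = nums[i] + (any maximum of the window dp[i+1..i+k])
theorem bLoop_getD_eq (nums : List Int) (k : Int) (hk : 1 ≤ k) (i : Nat)
    (hi : i + 2 ≤ nums.length) (js : Nat)
    (hj1 : i + 1 ≤ js) (hj2 : (js : Int) ≤ (i : Int) + k) (hj3 : js + 1 ≤ nums.length)
    (hmax : ∀ j : Nat, i + 1 ≤ j → (j : Int) ≤ (i : Int) + k → j + 1 ≤ nums.length →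
      (bLoop k nums).getD j 0 ≤ (bLoop k nums).getD js 0) :
    (bLoop k nums).getD i 0 = nums.getD i 0 + (bLoop k nums).getD js 0 := by
  have hlen : (bLoop k nums).length = nums.length := bLoop_length k nums
  have hi' : i < nums.length := by omega
  have hktn : (k.toNat : Int) = k := Int.toNat_of_nonneg (by omega)
  have hdropn : nums.drop i = nums[i] :: nums.drop (i + 1) := List.drop_eq_getElem_cons hi'
  have hne : nums.drop (i + 1) ≠ [] := by
    intro h
    have := congrArg List.length h
    simp at this; omega
  have key : (bLoop k nums).drop i
      = (nums[i] + (PySem.List.max? (((bLoop k nums).drop (i + 1)).take k.toNat) (fun v => v)).getD 0)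
        :: (bLoop k nums).drop (i + 1) := by
    conv_lhs => rw [← bLoop_drop, hdropn]
    rw [bLoop_cons k _ _ hne, bLoop_drop]
  have hWlen : ((((bLoop k nums).drop (i + 1)).take k.toNat)).length
      = min k.toNat (nums.length - (i + 1)) := by
    simp [hlen]
  have hWget? : ∀ t : Nat, t < k.toNat →
      ((((bLoop k nums).drop (i + 1)).take k.toNat))[t]? = (bLoop k nums)[i + 1 + t]? := by
    intro t ht
    rw [List.getElem?_take, if_pos ht, List.getElem?_drop]
  have hWne : (((bLoop k nums).drop (i + 1)).take k.toNat) ≠ [] := by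
    intro h
    have := congrArg List.length h
    rw [hWlen] at this; simp at this; omega
  obtain ⟨M, hM⟩ : ∃ M, PySem.List.max? (((bLoop k nums).drop (i + 1)).take k.toNat) (fun v => v) = some M := by
    cases h : PySem.List.max? (((bLoop k nums).drop (i + 1)).take k.toNat) (fun v => v) with
    | none => exact absurd ((PySem.List.max?_eq_none_iff _ _).mp h) hWne
    | some M => exact ⟨M, rfl⟩
  -- dp[js] is in the window, so dp[js] ≤ M
  have hjsW : (bLoop k nums).getD js 0 ∈ (((bLoop k nums).drop (i + 1)).take k.toNat) := by
    apply List.mem_iff_getElem?.mpr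
    refine ⟨js - (i + 1), ?_⟩
    rw [hWget? _ (by omega)]
    have hjj : i + 1 + (js - (i + 1)) = js := by omega
    rw [hjj]
    exact bLoop_getD_some nums k js (by omega)
  have h1 : (bLoop k nums).getD js 0 ≤ M := by
    simpa using PySem.List.max?_isMax hM _ hjsW
  -- M is a window value, so M ≤ dp[js]
  have h2 : M ≤ (bLoop k nums).getD js 0 := by
    obtain ⟨t, hMt⟩ := List.mem_iff_getElem?.mp (PySem.List.max?_mem hM)
    have htlt : t < min k.toNat (nums.length - (i + 1)) := by
      obtain ⟨hlt, -⟩ := List.getElem?_eq_some_iff.mp hMt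
      rw [hWlen] at hlt; exact hlt
    rw [hWget? t (by omega)] at hMt
    rw [bLoop_getD_some nums k (i + 1 + t) (by omega)] at hMt
    have hMv : (bLoop k nums).getD (i + 1 + t) 0 = M := by simpa using hMt
    rw [← hMv]
    exact hmax (i + 1 + t) (by omega) (by omega) (by omega)
  have hMeq : M = (bLoop k nums).getD js 0 := le_antisymm h2 h1
  have h0 : (bLoop k nums)[i]? = some (nums[i] + M) := by
    have hdz : ((bLoop k nums).drop i)[0]? = (bLoop k nums)[i]? := by
      rw [List.getElem?_drop]
      norm_num
    rw [← hdz, key]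
    simp [hM]
  have hfin : (bLoop k nums).getD i 0 = nums[i] + M := by
    rw [List.getD_eq_getElem?_getD, h0]; rfl
  rw [hfin, hMeq, List.getD_eq_getElem nums 0 hi']

-- invariant of A's heap before iteration i (D j is B's dp[j])
def InvA (D : Nat → Int) (n : Nat) (k : Int) (i : Nat) (q : List (Int × Int)) : Prop :=
  (∀ p ∈ q, ∃ j : Nat, i + 1 ≤ j ∧ j + 1 ≤ n ∧ p = (-D j, (j : Int))) ∧
  (∀ j : Nat, i + 1 ≤ j → (j : Int) ≤ (i : Int) + k → j + 1 ≤ n → (-D j, (j : Int)) ∈ q)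

-- one iteration: after the stale pops, the heap top is the window max
theorem stepA (nums : List Int) (k : Int) (hk : 1 ≤ k) (i : Nat)
    (hi : i + 2 ≤ nums.length) (q : List (Int × Int))
    (hInv : InvA (fun j => (bLoop k nums).getD j 0) nums.length k i q) :
    ∃ m, heapMin? (popStale ((i : Int) + k) q) = some m ∧
      nums.getD i 0 + (-m.1) = (bLoop k nums).getD i 0 := by
  have hwq : (-(bLoop k nums).getD (i + 1) 0, ((i + 1 : Nat) : Int)) ∈ q :=
    hInv.2 (i + 1) (le_refl _) (by push_cast; omega) (by omega)
  have hw1 : (-(bLoop k nums).getD (i + 1) 0, ((i + 1 : Nat) : Int)) ∈ popStale ((i : Int) + k) q :=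
    popStale_keeps _ _ _ hwq (by show ((i + 1 : Nat) : Int) ≤ (i : Int) + k; push_cast; omega)
  have hne : popStale ((i : Int) + k) q ≠ [] := by intro h; rw [h] at hw1; simp at hw1
  obtain ⟨m, hm⟩ := Option.isSome_iff_exists.mp (heapMin?_isSome hne)
  obtain ⟨js, hj1, hj3, hmeq⟩ := hInv.1 m (popStale_subset _ _ _ (heapMin?_mem hm))
  have hj2 : (js : Int) ≤ (i : Int) + k := by
    have := popStale_min_le _ _ hm
    rw [hmeq] at this; simpa using this
  have hmax : ∀ j : Nat, i + 1 ≤ j → (j : Int) ≤ (i : Int) + k → j + 1 ≤ nums.length →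
      (bLoop k nums).getD j 0 ≤ (bLoop k nums).getD js 0 := by
    intro j h1 h2 h3
    have hjq1 : (-(bLoop k nums).getD j 0, (j : Int)) ∈ popStale ((i : Int) + k) q :=
      popStale_keeps _ _ _ (hInv.2 j h1 h2 h3) h2
    have h5 := heapMin?_le _ _ hm _ hjq1
    rw [hmeq] at h5
    have h6 : -(bLoop k nums).getD js 0 ≤ -(bLoop k nums).getD j 0 := h5
    omega
  refine ⟨m, hm, ?_⟩
  rw [hmeq]
  have hrec := bLoop_getD_eq nums k hk i hi js hj1 hj2 hj3 hmax
  show nums.getD i 0 + -(-(bLoop k nums).getD js 0) = (bLoop k nums).getD i 0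
  rw [neg_neg, hrec]

theorem loopA_eq (nums : List Int) (k : Int) (hk : 1 ≤ k) :
    ∀ (i : Nat) (q : List (Int × Int)), i + 2 ≤ nums.length →
      InvA (fun j => (bLoop k nums).getD j 0) nums.length k i q →
      loopA nums k i q = (bLoop k nums).getD 0 0 := by
  intro i
  induction i with
  | zero =>
    intro q hi hInv
    obtain ⟨m, hm, hv⟩ := stepA nums k hk 0 hi q hInv
    simp only [loopA]
    rw [hm]
    simp only [Option.getD_some]
    rw [PySem.List.pyGet?_natCast, ← List.getD_eq_getElem?_getD]
    simpa using hv
  | succ i ih =>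
    intro q hi hInv
    obtain ⟨m, hm, hv⟩ := stepA nums k hk (i + 1) (by omega) q hInv
    simp only [loopA]
    rw [hm]
    simp only [Option.getD_some]
    rw [PySem.List.pyGet?_natCast, ← List.getD_eq_getElem?_getD]
    rw [hv]
    apply ih _ (by omega)
    constructor
    · intro p hp
      rcases List.mem_cons.mp hp with h1 | h1
      · exact ⟨i + 1, by omega, by omega, h1⟩
      · obtain ⟨j, hja, hjb, hjc⟩ := hInv.1 p (popStale_subset _ _ _ h1)
        exact ⟨j, by omega, hjb, hjc⟩
    · intro j h1 h2 h3
      by_cases hje : j = i + 1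
      · subst hje; exact List.mem_cons_self
      · have hjq : (-(bLoop k nums).getD j 0, (j : Int)) ∈ q :=
          hInv.2 j (by omega) (by push_cast at h2 ⊢; omega) h3
        exact List.mem_cons_of_mem _
          (popStale_keeps _ _ _ hjq (by show ((j : Nat) : Int) ≤ _; push_cast at h2 ⊢; omega))

-- ===== VERDICT (by name: the statement is the Claim_ definition above) =====
theorem maxResult2_spec : Claim_equal_maxResult2 := by
  intro nums k _ hpre
  obtain ⟨hn, hk⟩ := hpre
  unfold Spec_maxResult2 maxResult2 maxResult2_alt
  rw [if_pos hn]
  -- the last dp entry equals the last element of nums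
  have h1 : nums.length - 1 < nums.length := by omega
  have hdropn : nums.drop (nums.length - 1)
      = nums[nums.length - 1] :: nums.drop (nums.length - 1 + 1) :=
    List.drop_eq_getElem_cons h1
  have h2 : nums.drop (nums.length - 1 + 1) = [] := by
    apply List.drop_eq_nil_of_le; omega
  rw [h2] at hdropn
  have h3 : (bLoop k nums).drop (nums.length - 1) = [nums[nums.length - 1]] := by
    rw [← bLoop_drop, hdropn]; simp [bLoop]
  have h4 : (bLoop k nums).getD (nums.length - 1) 0 = nums[nums.length - 1] := by
    have h0 : ((bLoop k nums).drop (nums.length - 1))[0]? = some (nums[nums.length - 1]) := by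
      rw [h3]; rfl
    rw [List.getElem?_drop] at h0
    rw [List.getD_eq_getElem?_getD]
    simp at h0
    rw [h0]
    rfl
  have hlast : (bLoop k nums).getD (nums.length - 1) 0 = (PySem.List.pyGet? nums (-1)).getD 0 := by
    rw [h4, PySem.List.pyGet?_neg_one, List.getLast?_eq_getElem?,
      List.getElem?_eq_getElem (by omega : nums.length - 1 < nums.length)]
    rfl
  have hpair : (-((PySem.List.pyGet? nums (-1)).getD 0), ((nums.length : Int) - 1))
      = (-(bLoop k nums).getD (nums.length - 1) 0, ((nums.length - 1 : Nat) : Int)) := by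
    rw [hlast]
    simp [Prod.ext_iff]
    omega
  have hInv0 : InvA (fun j => (bLoop k nums).getD j 0) nums.length k (nums.length - 2)
      [(-((PySem.List.pyGet? nums (-1)).getD 0), ((nums.length : Int) - 1))] := by
    constructor
    · intro p hp
      simp only [List.mem_singleton] at hp
      refine ⟨nums.length - 1, by omega, by omega, ?_⟩
      rw [hp, hpair]
    · intro j hj1 hj2 hj3
      have hje : j = nums.length - 1 := by omega
      subst hje
      rw [← hpair]
      exact List.mem_cons_self
  rw [loopA_eq nums k hk (nums.length - 2) _ (by omega) hInv0]
  obtain ⟨a, l, hal⟩ : ∃ a l, bLoop k nums = a :: l := by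
    cases hb : bLoop k nums with
    | nil =>
      have := bLoop_length k nums
      rw [hb] at this; simp at this; omega
    | cons a l => exact ⟨a, l, rfl⟩
  rw [hal]
  rfl
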